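-- pv_equiv track=rewrite | github.com/Sarifs/python-src | smt.py | stm
-- ===== SOURCE A (Python) =====
-- def stm(ux,u0,c0,c1):
--     if ux == 0:
--         return u0
--     i = 0
--     while (i < ux):
--         u0 = (c0 + u0) - (i * c1)
--         i = i + 1
--     return u0
-- ===== SOURCE B (Python) =====
-- def stm(ux, u0, c0, c1):
--     # closed form of the arithmetic-series accumulation; O(1) instead of O(ux)
--     if ux <= 0:
--         return u0
--     return u0 + ux * c0 - c1 * ux * (ux - 1) // 2
-- ===== Notes on version B (the rewrite author's own statement) =====
-- stated objective: faster
-- what changed: Replaced the O(ux) accumulation loop with the closed-form arithmetic-series formula u0 + ux*c0 - c1*ux*(ux-1)//2.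
import Mathlib
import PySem

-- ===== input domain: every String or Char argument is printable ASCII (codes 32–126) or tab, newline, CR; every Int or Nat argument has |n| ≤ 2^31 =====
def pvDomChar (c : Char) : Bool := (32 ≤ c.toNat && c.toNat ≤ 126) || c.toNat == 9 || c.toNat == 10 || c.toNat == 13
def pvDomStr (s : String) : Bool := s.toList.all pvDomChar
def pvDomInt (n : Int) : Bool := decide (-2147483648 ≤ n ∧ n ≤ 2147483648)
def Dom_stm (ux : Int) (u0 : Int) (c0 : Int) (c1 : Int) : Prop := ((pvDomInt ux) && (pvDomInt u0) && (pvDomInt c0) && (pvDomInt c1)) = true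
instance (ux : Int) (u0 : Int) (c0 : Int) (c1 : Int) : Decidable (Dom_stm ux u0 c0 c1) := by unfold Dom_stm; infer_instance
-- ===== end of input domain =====

-- B replaces A's O(ux) accumulation loop with the closed-form arithmetic-series formula (objective: faster).

-- ===== PORT A =====
-- the while loop, counting down the remaining iterations n (= ux - i on entry)
def stmLoop (n : Nat) (i : Int) (c0 : Int) (c1 : Int) (u0 : Int) : Int :=
  match n with
  | 0 => u0
  | n + 1 => stmLoop n (i + 1) c0 c1 ((c0 + u0) - i * c1)

def stm (ux : Int) (u0 : Int) (c0 : Int) (c1 : Int) : Int :=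
  if ux = 0 then u0
  else stmLoop ux.toNat 0 c0 c1 u0   -- for ux < 0 the loop body never runs (toNat = 0), as in Python

-- ===== PORT B =====
def stm_alt (ux : Int) (u0 : Int) (c0 : Int) (c1 : Int) : Int :=
  if ux ≤ 0 then u0
  else u0 + ux * c0 - PySem.Int.floordiv (c1 * ux * (ux - 1)) 2

-- ===== PRECONDITION & SPEC =====
def Spec_stm (ux : Int) (u0 : Int) (c0 : Int) (c1 : Int) (out : Int) : Prop := out = stm_alt ux u0 c0 c1
instance (ux : Int) (u0 : Int) (c0 : Int) (c1 : Int) (out : Int) : Decidable (Spec_stm ux u0 c0 c1 out) := by unfold Spec_stm; infer_instance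

-- ===== CLAIM (what is proved, stated in full; the proofs are below) =====
def Claim_equal_stm : Prop := ∀ (ux : Int) (u0 : Int) (c0 : Int) (c1 : Int), Dom_stm ux u0 c0 c1 → Spec_stm ux u0 c0 c1 (stm ux u0 c0 c1)

-- ===== LEMMAS AND PROOFS =====

-- loop invariant: twice the loop result, in closed form
theorem stmLoop_closed (c0 c1 : Int) (n : Nat) : ∀ (i u0 : Int),
    2 * stmLoop n i c0 c1 u0 = 2 * u0 + 2 * (n : Int) * c0 - c1 * ((n : Int) * (2 * i + (n : Int) - 1)) := by
  induction n with
  | zero => intro i u0; simp [stmLoop]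
  | succ n ih =>
    intro i u0
    rw [stmLoop, ih]
    push_cast
    ring

theorem stm_spec : Claim_equal_stm := by
  intro ux u0 c0 c1 _
  unfold Spec_stm stm stm_alt
  by_cases h0 : ux = 0
  · simp [h0]
  · by_cases hneg : ux ≤ 0
    · have : ux.toNat = 0 := Int.toNat_of_nonpos hneg
      simp [h0, hneg, this, stmLoop]
    · have hpos : 0 < ux := by omega
      simp only [h0, hneg, if_false]
      -- ux*(ux-1) is even, so the floor division is exact
      have heven : Even ((ux - 1) * ux) := by
        have h := Int.even_mul_succ_self (ux - 1)
        simpa using h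
      obtain ⟨k, hk⟩ := heven
      have hnum : c1 * ux * (ux - 1) = 2 * (c1 * k) := by rw [mul_assoc, mul_comm ux (ux - 1), hk]; ring
      have hfd : PySem.Int.floordiv (c1 * ux * (ux - 1)) 2 = c1 * k := by
        rw [hnum, PySem.Int.floordiv_eq_ediv_of_pos (by omega)]
        exact Int.mul_ediv_cancel_left _ (by omega)
      have hloop := stmLoop_closed c0 c1 ux.toNat 0 u0
      have hcast : ((ux.toNat : Int)) = ux := Int.toNat_of_nonneg (le_of_lt hpos)
      rw [hcast] at hloop
      have hc : ux * (2 * 0 + ux - 1) = k + k := by linear_combination hk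
      have h2 : 2 * stmLoop ux.toNat 0 c0 c1 u0 = 2 * (u0 + ux * c0 - c1 * k) := by
        rw [hloop, hc]; ring
      rw [hfd]
      linarith
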